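-- pv_equiv track=rewrite | github.com/Player223124/BlockCode | algorithm.py | dynamic
-- ===== SOURCE A (Python) =====
-- def dynamic(matrix):
--     dynamic = [0 for _ in range(len(matrix[0]))]
--
--     for row_index in range(len(matrix)):
--         for column_index in range(len(matrix[0])):
--             if (matrix[row_index][column_index] == 1) and (dynamic[column_index] == 0):
--                 dynamic[column_index] = row_index + 1
--             elif (matrix[row_index][column_index] == 1) and (dynamic[column_index] > 0):
--                 dynamic[column_index] = -1
--     return(dynamic)
-- ===== SOURCE B (Python) =====
-- def dynamic(matrix):
--     result = []
--     for column_index in range(len(matrix[0])):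
--         column = [matrix[row_index][column_index] for row_index in range(len(matrix))]
--         ones = column.count(1)
--         if ones == 0:
--             result.append(0)
--         elif ones >= 2:
--             result.append(-1)
--         else:
--             result.append(column.index(1) + 1)
--     return result
-- ===== Notes on version B (the rewrite author's own statement) =====
-- stated objective: simpler
-- what changed: Replaces A's row-major in-place running update of a state array with a column-wise gather-then-classify pass: each column is extracted once and classified by its count of 1s (0, -1, or index+1).
import Mathlib
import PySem

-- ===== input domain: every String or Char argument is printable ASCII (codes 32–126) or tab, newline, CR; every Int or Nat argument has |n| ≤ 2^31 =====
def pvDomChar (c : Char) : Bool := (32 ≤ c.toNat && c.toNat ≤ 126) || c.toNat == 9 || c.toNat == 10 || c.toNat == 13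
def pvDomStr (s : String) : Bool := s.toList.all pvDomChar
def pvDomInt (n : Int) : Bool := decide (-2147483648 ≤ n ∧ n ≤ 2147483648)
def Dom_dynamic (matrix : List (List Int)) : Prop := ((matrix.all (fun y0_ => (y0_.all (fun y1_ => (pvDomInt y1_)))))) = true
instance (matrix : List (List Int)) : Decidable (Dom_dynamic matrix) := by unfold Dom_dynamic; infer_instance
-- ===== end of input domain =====

-- B replaces A's row-major in-place running update by a column-wise gather-then-classify
-- pass (count the 1s in each column, then emit 0 / -1 / first-index+1); same cost, simpler.

-- ===== PORT A =====
-- row-major double loop updating a mutable state array, as in A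
def dynamic (matrix : List (List Int)) : List Int :=
  let dyn0 : List Int := (List.range (matrix.headD []).length).map (fun _ => (0 : Int))
  (List.range matrix.length).foldl (fun dyn row_index =>
    (List.range (matrix.headD []).length).foldl (fun dyn column_index =>
      if ((matrix.getD row_index []).getD column_index 0 = 1) ∧ (dyn.getD column_index 0 = 0) then
        dyn.set column_index ((row_index : Int) + 1)
      else if ((matrix.getD row_index []).getD column_index 0 = 1) ∧ (dyn.getD column_index 0 > 0) then
        dyn.set column_index (-1)
      else dyn) dyn) dyn0

-- ===== PORT B =====
-- for each column: gather the column, classify by its count of 1s, append to the result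
def dynamic_alt (matrix : List (List Int)) : List Int :=
  (List.range (matrix.headD []).length).foldl (fun result column_index =>
    let column := (List.range matrix.length).map
      (fun row_index => (matrix.getD row_index []).getD column_index 0)
    let ones := column.count 1
    result ++ [if ones = 0 then (0 : Int)
               else if ones ≥ 2 then -1
               else (((PySem.List.index? column 1).getD 0 : Nat) : Int) + 1]) []

-- ===== PRECONDITION & SPEC =====
-- Pre_ excludes the empty matrix and ragged matrices whose later rows are shorter than
-- row 0: there the Python A (and B) raise IndexError.
def Pre_dynamic (matrix : List (List Int)) : Prop :=
  matrix ≠ [] ∧ ∀ row ∈ matrix, (matrix.headD []).length ≤ row.length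
instance (matrix : List (List Int)) : Decidable (Pre_dynamic matrix) := by
  unfold Pre_dynamic; infer_instance

def pvWitness_dynamic : List (List Int) := [[1, 0, 2], [0, 0, 1], [1, 1, 0]]

def Spec_dynamic (matrix : List (List Int)) (out : List Int) : Prop := out = dynamic_alt matrix
instance (matrix : List (List Int)) (out : List Int) : Decidable (Spec_dynamic matrix out) := by unfold Spec_dynamic; infer_instance

-- ===== CLAIM (what is proved, stated in full; the proofs are below) =====
def Claim_equal_dynamic : Prop := ∀ (matrix : List (List Int)), Dom_dynamic matrix → Pre_dynamic matrix → Spec_dynamic matrix (dynamic matrix)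

-- ===== LEMMAS AND PROOFS =====

-- the matrix entry at row r, column c (0 outside the matrix; Pre_ keeps Python in range)
def pvCell (matrix : List (List Int)) (r c : Nat) : Int :=
  (matrix.getD r []).getD c 0

-- A's per-cell state transition
def pvStep (r : Nat) (v d : Int) : Int :=
  if v = 1 ∧ d = 0 then (r : Int) + 1 else if v = 1 ∧ d > 0 then -1 else d

-- A's state for one fixed column after consuming the given row indices
def pvRun (matrix : List (List Int)) (c : Nat) (rs : List Nat) (d : Int) : Int :=
  rs.foldl (fun d r => pvStep r (pvCell matrix r c) d) d

-- the per-column recursion (value list with running row counter)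
def pvGo (r : Nat) (d : Int) : List Int → Int
  | [] => d
  | v :: vs => pvGo (r + 1) (pvStep r v d) vs

-- inner loop body of A's port, abbreviated
def pvInner (matrix : List (List Int)) (r : Nat) (dyn : List Int) (c : Nat) : List Int :=
  if ((matrix.getD r []).getD c 0 = 1) ∧ (dyn.getD c 0 = 0) then
    dyn.set c ((r : Int) + 1)
  else if ((matrix.getD r []).getD c 0 = 1) ∧ (dyn.getD c 0 > 0) then
    dyn.set c (-1)
  else dyn

lemma inner_getD_self (matrix : List (List Int)) (r : Nat) (dyn : List Int) (c : Nat) :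
    (pvInner matrix r dyn c).getD c 0 =
      if c < dyn.length then pvStep r (pvCell matrix r c) (dyn.getD c 0) else dyn.getD c 0 := by
  by_cases hlt : c < dyn.length
  · unfold pvInner pvStep pvCell
    split_ifs <;> simp_all
  · have hset : ∀ v : Int, dyn.set c v = dyn := fun v => List.set_eq_of_length_le (by omega)
    unfold pvInner
    split_ifs <;> simp_all

lemma inner_getD_ne (matrix : List (List Int)) (r : Nat) (dyn : List Int) (c j : Nat)
    (h : c ≠ j) : (pvInner matrix r dyn c).getD j 0 = dyn.getD j 0 := by
  unfold pvInner
  split_ifs <;> simp [List.getD, List.getElem?_set_ne h]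

lemma inner_length (matrix : List (List Int)) (r : Nat) :
    ∀ (n : Nat) (dyn : List Int),
      ((List.range n).foldl (pvInner matrix r) dyn).length = dyn.length := by
  intro n
  induction n with
  | zero => intro dyn; simp
  | succ n ih =>
    intro dyn
    rw [List.range_succ, List.foldl_append]
    simp only [List.foldl_cons, List.foldl_nil]
    rw [show ∀ d, (pvInner matrix r d n).length = d.length by
      intro d; unfold pvInner; split_ifs <;> simp]
    exact ih dyn

lemma inner_getD (matrix : List (List Int)) (r : Nat) :
    ∀ (n : Nat) (dyn : List Int) (c : Nat),
      ((List.range n).foldl (pvInner matrix r) dyn).getD c 0 =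
        if c < n ∧ c < dyn.length then pvStep r (pvCell matrix r c) (dyn.getD c 0)
        else dyn.getD c 0 := by
  intro n
  induction n with
  | zero => intro dyn c; simp
  | succ n ih =>
    intro dyn c
    rw [List.range_succ, List.foldl_append]
    simp only [List.foldl_cons, List.foldl_nil]
    have hlen := inner_length matrix r n dyn
    by_cases hc : c = n
    · subst hc
      have hid : ((List.range c).foldl (pvInner matrix r) dyn).getD c 0 = dyn.getD c 0 := by
        rw [ih]; simp
      rw [inner_getD_self, hlen, hid]
      simp
    · rw [inner_getD_ne _ _ _ _ _ (fun h => hc h.symm), ih]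
      simp only [show (c < n + 1 ∧ c < dyn.length) ↔ (c < n ∧ c < dyn.length) by omega]

lemma outer_getD (matrix : List (List Int)) (w : Nat) :
    ∀ (rs : List Nat) (dyn : List Int) (c : Nat), dyn.length = w → c < w →
      ((rs.foldl (fun dyn r => (List.range w).foldl (pvInner matrix r) dyn) dyn).getD c 0) =
        pvRun matrix c rs (dyn.getD c 0) := by
  intro rs
  induction rs with
  | nil => intro dyn c _ _; simp [pvRun]
  | cons r rs ih =>
    intro dyn c hlen hc
    simp only [List.foldl_cons]
    rw [ih _ c (by rw [inner_length, hlen]) hc, inner_getD]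
    simp only [hc, hlen, and_self, if_pos]
    simp [pvRun]

lemma outer_length (matrix : List (List Int)) (w : Nat) :
    ∀ (rs : List Nat) (dyn : List Int),
      (rs.foldl (fun dyn r => (List.range w).foldl (pvInner matrix r) dyn) dyn).length = dyn.length := by
  intro rs
  induction rs with
  | nil => intro dyn; simp
  | cons r rs ih => intro dyn; simp only [List.foldl_cons]; rw [ih, inner_length]

lemma go_neg (vs : List Int) : ∀ (r : Nat), pvGo r (-1) vs = -1 := by
  induction vs with
  | nil => intro r; simp [pvGo]
  | cons v vs ih =>
    intro r
    have : pvStep r v (-1) = -1 := by unfold pvStep; simp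
    simp [pvGo, this, ih]

lemma go_pos (vs : List Int) : ∀ (r : Nat) (p : Int), 0 < p →
    pvGo r p vs = if vs.count 1 = 0 then p else -1 := by
  induction vs with
  | nil => intro r p _; simp [pvGo]
  | cons v vs ih =>
    intro r p hp
    by_cases hv : v = 1
    · subst hv
      have : pvStep r 1 p = -1 := by unfold pvStep; split_ifs <;> simp_all
      simp [pvGo, this, go_neg]
    · have : pvStep r v p = p := by unfold pvStep; split_ifs <;> omega
      simp [pvGo, this, ih _ _ hp, hv]

lemma go_zero (vs : List Int) : ∀ (r : Nat),
    pvGo r 0 vs =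
      if vs.count 1 = 0 then 0
      else if vs.count 1 ≥ 2 then -1
      else (r : Int) + (((PySem.List.index? vs 1).getD 0 : Nat) : Int) + 1 := by
  induction vs with
  | nil => intro r; simp [pvGo]
  | cons v vs ih =>
    intro r
    by_cases hv : v = 1
    · subst hv
      have hs : pvStep r 1 0 = (r : Int) + 1 := by unfold pvStep; simp
      rw [pvGo, hs, go_pos vs (r+1) _ (by omega)]
      by_cases h0 : vs.count 1 = 0
      · simp [h0]
      · have hc1 : ¬((1 :: vs).count 1 = 0) := by rw [List.count_cons_self]; omega
        have hc2 : (1 :: vs).count 1 ≥ 2 := by rw [List.count_cons_self]; omega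
        rw [if_neg h0, if_neg hc1, if_pos hc2]
    · have hs : pvStep r v 0 = 0 := by unfold pvStep; split_ifs <;> simp_all
      rw [pvGo, hs, ih (r+1)]
      have hcnt : (v :: vs).count 1 = vs.count 1 := by simp [hv]
      have hidx : PySem.List.index? (v :: vs) 1 = (PySem.List.index? vs 1).map (· + 1) :=
        PySem.List.index?_cons_of_ne vs (fun h => hv h)
      rw [hcnt, hidx]
      split_ifs with h1 h2
      · rfl
      · rfl
      · have hmem : (1 : Int) ∈ vs := List.count_pos_iff.mp (by omega)
        obtain ⟨k, hk⟩ := Option.isSome_iff_exists.mp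
          ((PySem.List.index?_isSome_iff vs 1).mpr hmem)
        rw [hk]; simp; ring

lemma run_eq_go (matrix : List (List Int)) (c : Nat) :
    ∀ (m s : Nat) (d : Int),
      pvRun matrix c (List.range' s m) d =
        pvGo s d ((List.range' s m).map (fun r => pvCell matrix r c)) := by
  intro m
  induction m with
  | zero => intro s d; simp [pvRun, pvGo]
  | succ m ih =>
    intro s d
    rw [List.range'_succ]
    simp only [List.map_cons, pvGo, pvRun, List.foldl_cons]
    exact ih (s+1) _

lemma foldl_append_map {α β : Type} (f : α → β) :
    ∀ (l : List α) (acc : List β), l.foldl (fun acc x => acc ++ [f x]) acc = acc ++ l.map f := by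
  intro l
  induction l with
  | nil => intro acc; simp
  | cons x l ih => intro acc; simp [ih]

lemma dynamic_alt_eq_map (matrix : List (List Int)) :
    dynamic_alt matrix = (List.range (matrix.headD []).length).map (fun c =>
      let column := (List.range matrix.length).map (fun r => pvCell matrix r c)
      if column.count 1 = 0 then (0 : Int)
      else if column.count 1 ≥ 2 then -1
      else (((PySem.List.index? column 1).getD 0 : Nat) : Int) + 1) := by
  unfold dynamic_alt
  rw [foldl_append_map]
  simp [pvCell]

-- ===== VERDICT (by name: the statement is the Claim_ definition above) =====
theorem dynamic_spec : Claim_equal_dynamic := by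
  intro matrix _ _
  unfold Spec_dynamic
  have hA : dynamic matrix =
      (List.range matrix.length).foldl
        (fun dyn r => (List.range (matrix.headD []).length).foldl (pvInner matrix r) dyn)
        ((List.range (matrix.headD []).length).map (fun _ => (0 : Int))) := by
    unfold dynamic pvInner; rfl
  rw [dynamic_alt_eq_map, hA]
  apply List.ext_getElem
  · rw [outer_length]; simp
  · intro c hc1 hc2
    have hcw : c < (matrix.headD []).length := by simpa using hc2
    rw [← List.getD_eq_getElem _ 0]
    rw [outer_getD matrix (matrix.headD []).length _ _ c (by simp) hcw]
    have h0 : ((List.range (matrix.headD []).length).map (fun _ => (0 : Int))).getD c 0 = 0 := by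
      simp [List.getD]
    rw [h0]
    conv_lhs => rw [List.range_eq_range', run_eq_go, go_zero]
    simp only [List.getElem_map, List.getElem_range, ← List.range_eq_range']
    split_ifs <;> simp
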